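-- pv_equiv track=rewrite | github.com/MITLibraries/geo-harvester | harvester/utils.py | dedupe_list_of_values
-- ===== SOURCE A (Python) =====
-- def dedupe_list_of_values(list_of_values: list) -> list:
--     """Utility function to dedupe list of values in a list.
--
--     This function dedupes regardless of value casing (if string) or whitespace. If
--     duplicates are found, this utility has a preference order of:
--         - TitleCase
--         - UPPERCASE
--         - lowercase
--     """
--     if not list_of_values:
--         return list_of_values
--
--     # handle edge case where OGM repositories set a single value as a list
--     # when it should be a single, scalar value
--     if (
--         isinstance(list_of_values, list)
--         and len(list_of_values) == 1
--         and isinstance(list_of_values[0], list)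
--     ):
--         list_of_values = list_of_values[0]
--
--     temp_dict = {}
--
--     for item in list_of_values:
--         if isinstance(item, str):
--             key = item.lower().strip()
--             value = item.strip()
--             # Add key if not yet seen
--             if key not in temp_dict:
--                 temp_dict[key] = value
--             else:  # noqa: PLR5501
--                 # If current value is TitleCase, overwrite the value in the dictionary.
--                 if value.istitle():  # noqa: SIM114
--                     temp_dict[key] = value
--                 # If current value is UPPERCASE and the value in dictionary isn't
--                 # TitleCase, overwrite it.
--                 elif value.isupper() and not temp_dict[key].istitle():  # noqa: SIM114
--                     temp_dict[key] = value
--                 # If the current value is lowercase and the dictionary value isn't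
--                 # UPPERCASE or TitleCase, overwrite it.
--                 elif value.islower() and not (
--                     temp_dict[key].isupper() or temp_dict[key].istitle()
--                 ):
--                     temp_dict[key] = value
--         else:
--             # Handle non-string items
--             temp_dict.setdefault(item, item)
--
--     return list(temp_dict.values())
-- ===== SOURCE B (Python) =====
-- def dedupe_list_of_values(list_of_values: list) -> list:
--     """Dedupe case/whitespace-insensitively, preferring TitleCase > UPPER > lower.
--
--     Two passes: group candidates per normalized key, then pick each group's winner
--     by rank (title=3, upper=2, lower=1, other=0; later candidates win ties of rank >= 1).
--     """
--     if not list_of_values: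
--         return list_of_values
--
--     if (
--         isinstance(list_of_values, list)
--         and len(list_of_values) == 1
--         and isinstance(list_of_values[0], list)
--     ):
--         list_of_values = list_of_values[0]
--
--     groups = {}
--     for item in list_of_values:
--         if isinstance(item, str):
--             value = item.strip()
--             key = item.lower().strip()
--         else:
--             value = item
--             key = item
--         groups.setdefault(key, []).append(value)
--
--     result = []
--     for candidates in groups.values():
--         best = candidates[0]
--         for value in candidates[1:]:
--             rank = _rank(value)
--             if rank >= 1 and rank >= _rank(best):
--                 best = value
--         result.append(best)
--     return result
--
--
-- def _rank(value):
--     if not isinstance(value, str):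
--         return 0
--     if value.istitle():
--         return 3
--     if value.isupper():
--         return 2
--     if value.islower():
--         return 1
--     return 0
-- ===== Notes on version B (the rewrite author's own statement) =====
-- stated objective: alternative
-- what changed: A dedupes in one pass, conditionally overwriting a dict entry via a three-branch casing chain; B first groups all stripped candidates per lowercased key into an ordered dict of lists, then reduces each group with a numeric rank (title=3/upper=2/lower=1/other=0, later candidate wins on rank>=1 and rank>=best).
import Mathlib
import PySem

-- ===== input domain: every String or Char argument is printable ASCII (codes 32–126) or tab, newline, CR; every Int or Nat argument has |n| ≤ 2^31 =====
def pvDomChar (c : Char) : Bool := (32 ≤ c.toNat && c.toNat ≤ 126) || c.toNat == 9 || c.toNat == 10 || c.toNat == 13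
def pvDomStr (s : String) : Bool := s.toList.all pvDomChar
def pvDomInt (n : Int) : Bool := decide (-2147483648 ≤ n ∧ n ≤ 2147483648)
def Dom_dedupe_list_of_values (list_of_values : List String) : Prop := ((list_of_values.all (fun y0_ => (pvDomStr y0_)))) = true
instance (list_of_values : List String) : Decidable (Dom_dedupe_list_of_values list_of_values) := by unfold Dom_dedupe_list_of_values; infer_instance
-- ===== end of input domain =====

-- B replaces A's one-pass conditional-overwrite dict by a group-then-reduce decomposition
-- (ordered groups of candidates, then a rank-based reduction per group); objective: alternative.
-- Both ports agree with their Pythons on the task's List String domain, where A's non-string and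
-- single-nested-list branches are unreachable.

-- ===== PORT A =====
-- Shared ports of the Python str builtins istitle/isupper/islower (both Pythons call them).
-- Exact on the Dom (ASCII) domain, where the cased characters are exactly A-Z / a-z.
def pyIstitleGo : List Char → Bool → Bool → Bool
  | [], _, found => found
  | c :: rest, prevCased, found =>
    if PySem.Chars.isupper c then
      if prevCased then false else pyIstitleGo rest true true
    else if PySem.Chars.islower c then
      if !prevCased then false else pyIstitleGo rest true true
    else pyIstitleGo rest false found

def pyStrIstitle (s : String) : Bool := pyIstitleGo s.toList false false

def pyStrIsupper (s : String) : Bool :=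
  (s.toList.any PySem.Chars.isupper) && !(s.toList.any PySem.Chars.islower)

def pyStrIslower (s : String) : Bool :=
  (s.toList.any PySem.Chars.islower) && !(s.toList.any PySem.Chars.isupper)

def dedupe_list_of_values (list_of_values : List String) : List String :=
  if list_of_values = [] then list_of_values
  else
    let temp_dict : PySem.Dict String String :=
      list_of_values.foldl (fun d item =>
        let key := PySem.Str.strip (PySem.Str.lower item)
        let value := PySem.Str.strip item
        if !(d.contains key) then d.insert key value
        else
          if pyStrIstitle value then d.insert key value
          else if pyStrIsupper value && !(pyStrIstitle (d.getD key "")) then d.insert key value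
          else if pyStrIslower value &&
              !(pyStrIsupper (d.getD key "") || pyStrIstitle (d.getD key "")) then d.insert key value
          else d) PySem.Dict.empty
    temp_dict.values

-- ===== PORT B =====
def pvRank (value : String) : Int :=
  if pyStrIstitle value then 3
  else if pyStrIsupper value then 2
  else if pyStrIslower value then 1
  else 0

-- candidates are nonempty in every call Source B makes; [] is an unreachable default
def pvPick (candidates : List String) : String :=
  match candidates with
  | [] => ""
  | best :: rest =>
    rest.foldl (fun best value =>
      if 1 ≤ pvRank value ∧ pvRank best ≤ pvRank value then value else best) best

def dedupe_list_of_values_alt (list_of_values : List String) : List String :=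
  if list_of_values = [] then list_of_values
  else
    let groups : PySem.Dict String (List String) :=
      list_of_values.foldl (fun g item =>
        let value := PySem.Str.strip item
        let key := PySem.Str.strip (PySem.Str.lower item)
        g.modify key [] (· ++ [value])) PySem.Dict.empty
    groups.values.foldl (fun result candidates => result ++ [pvPick candidates]) []

-- ===== PRECONDITION & SPEC =====
def Spec_dedupe_list_of_values (list_of_values : List String) (out : List String) : Prop := out = dedupe_list_of_values_alt list_of_values
instance (list_of_values : List String) (out : List String) : Decidable (Spec_dedupe_list_of_values list_of_values out) := by unfold Spec_dedupe_list_of_values; infer_instance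

-- ===== CLAIM (what is proved, stated in full; the proofs are below) =====
def Claim_equal_dedupe_list_of_values : Prop := ∀ (list_of_values : List String), Dom_dedupe_list_of_values list_of_values → Spec_dedupe_list_of_values list_of_values (dedupe_list_of_values list_of_values)

-- ===== LEMMAS AND PROOFS =====

-- A's loop body and B's grouping loop body, named for the proofs (definitionally the ports' bodies)
def pvStepA (d : PySem.Dict String String) (item : String) : PySem.Dict String String :=
  let key := PySem.Str.strip (PySem.Str.lower item)
  let value := PySem.Str.strip item
  if !(d.contains key) then d.insert key value
  else
    if pyStrIstitle value then d.insert key value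
    else if pyStrIsupper value && !(pyStrIstitle (d.getD key "")) then d.insert key value
    else if pyStrIslower value &&
        !(pyStrIsupper (d.getD key "") || pyStrIstitle (d.getD key "")) then d.insert key value
    else d

def pvStepB (g : PySem.Dict String (List String)) (item : String) : PySem.Dict String (List String) :=
  g.modify (PySem.Str.strip (PySem.Str.lower item)) [] (· ++ [PySem.Str.strip item])

-- the simulation map: B's group dict, each group replaced by its selected winner
def pvMap (g : PySem.Dict String (List String)) : PySem.Dict String String :=
  PySem.Dict.mk (g.items.map (fun p => (p.1, pvPick p.2)))

theorem pvMap_get? (g : PySem.Dict String (List String)) (k : String) :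
    (pvMap g).get? k = (g.get? k).map pvPick := by
  simp [pvMap, PySem.Dict.get?, List.find?_map, Function.comp_def, Option.map_map]

theorem pvMap_contains (g : PySem.Dict String (List String)) (k : String) :
    (pvMap g).contains k = g.contains k := by
  simp [pvMap, PySem.Dict.contains, List.any_map, Function.comp_def]

theorem pvMap_insert (g : PySem.Dict String (List String)) (k : String) (w : List String) :
    pvMap (g.insert k w) = (pvMap g).insert k (pvPick w) := by
  apply PySem.Dict.ext
  by_cases hc : g.contains k = true
  · rw [show (pvMap (g.insert k w)).items = (g.insert k w).items.map (fun p => (p.1, pvPick p.2)) from rfl,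
      PySem.Dict.items_insert_of_contains g w hc,
      PySem.Dict.items_insert_of_contains (pvMap g) (pvPick w) (by rw [pvMap_contains]; exact hc)]
    simp only [pvMap, List.map_map]
    apply List.map_congr_left
    intro p _
    by_cases hk : p.1 = k <;> simp [hk]
  · rw [show (pvMap (g.insert k w)).items = (g.insert k w).items.map (fun p => (p.1, pvPick p.2)) from rfl,
      PySem.Dict.items_insert_of_not_contains g w (by simpa using hc),
      PySem.Dict.items_insert_of_not_contains (pvMap g) (pvPick w)
        (by rw [pvMap_contains]; simpa using hc)]
    simp [pvMap]

theorem pvPick_append (vs : List String) (v : String) (hvs : vs ≠ []) :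
    pvPick (vs ++ [v]) =
      if 1 ≤ pvRank v ∧ pvRank (pvPick vs) ≤ pvRank v then v else pvPick vs := by
  cases vs with
  | nil => exact absurd rfl hvs
  | cons b rest => simp [pvPick, List.foldl_append]

-- A's three-branch overwrite chain is the rank rule (pure case analysis on the five casing bits)
theorem pvChainA (d : PySem.Dict String String) (k v cur : String) (hcur : d.getD k "" = cur) :
    (if pyStrIstitle v then d.insert k v
     else if pyStrIsupper v && !(pyStrIstitle (d.getD k "")) then d.insert k v
     else if pyStrIslower v &&
         !(pyStrIsupper (d.getD k "") || pyStrIstitle (d.getD k "")) then d.insert k v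
     else d) =
    if 1 ≤ pvRank v ∧ pvRank cur ≤ pvRank v then d.insert k v else d := by
  subst hcur
  cases h1 : pyStrIstitle v <;> cases h2 : pyStrIsupper v <;> cases h3 : pyStrIslower v <;>
    cases h4 : pyStrIstitle (d.getD k "") <;> cases h5 : pyStrIsupper (d.getD k "") <;>
    cases h6 : pyStrIslower (d.getD k "") <;>
    simp [pvRank, h1, h2, h3, h4, h5, h6]

theorem pvStep_sim (g : PySem.Dict String (List String)) (x : String)
    (hne : ∀ p ∈ g.items, p.2 ≠ []) (hnd : g.keys.Nodup) :
    pvStepA (pvMap g) x = pvMap (pvStepB g x) := by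
  have hmod : pvStepB g x =
      g.insert (PySem.Str.strip (PySem.Str.lower x))
        (g.getD (PySem.Str.strip (PySem.Str.lower x)) [] ++ [PySem.Str.strip x]) := rfl
  set k := PySem.Str.strip (PySem.Str.lower x) with hk
  set v := PySem.Str.strip x with hv
  by_cases hc : g.contains k = true
  · -- key already grouped: A overwrites per the chain, B appends a candidate
    obtain ⟨vs, hvs⟩ : ∃ vs, g.get? k = some vs := by
      rcases h : g.get? k with _ | vs
      · rw [PySem.Dict.contains_eq_isSome_get?, h] at hc; simp at hc
      · exact ⟨vs, rfl⟩
    have hvsne : vs ≠ [] := hne _ (PySem.Dict.mem_items_of_get?_eq_some g hvs)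
    have hgD : g.getD k [] = vs := PySem.Dict.getD_of_get?_eq_some g [] hvs
    have hcurD : (pvMap g).getD k "" = pvPick vs := by
      rw [PySem.Dict.getD_eq_get?_getD, pvMap_get?, hvs]; rfl
    have hAc : (pvMap g).contains k = true := by rw [pvMap_contains]; exact hc
    rw [hmod, hgD, pvMap_insert, pvPick_append vs v hvsne]
    show (if !((pvMap g).contains k) then (pvMap g).insert k v else _) = _
    rw [hAc]
    simp only [Bool.not_true, Bool.false_eq_true, if_false]
    rw [pvChainA (pvMap g) k v (pvPick vs) hcurD]
    by_cases hcond : 1 ≤ pvRank v ∧ pvRank (pvPick vs) ≤ pvRank v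
    · simp [hcond]
    · simp only [hcond, if_false]
      symm
      -- re-inserting the present winner is a no-op
      have hvw : (pvMap g).get? k = some (pvPick vs) := by rw [pvMap_get?, hvs]; rfl
      apply PySem.Dict.ext
      rw [PySem.Dict.items_insert_of_contains (pvMap g) (pvPick vs) hAc]
      have hndA : (pvMap g).keys.Nodup := by
        have : (pvMap g).keys = g.keys := by
          simp [pvMap, PySem.Dict.keys, List.map_map, Function.comp_def]
        rw [this]; exact hnd
      have : ∀ p ∈ (pvMap g).items,
          (if p.1 == k then (k, pvPick vs) else p) = p := by
        intro p hp
        by_cases hpk : p.1 = k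
        · have hpmem : (k, p.2) ∈ (pvMap g).items := by rw [← hpk]; exact hp
          have h1 : (pvMap g).getD k "" = p.2 :=
            PySem.Dict.getD_of_mem_items (pvMap g) hpmem hndA ""
          have hpv : p.2 = pvPick vs := by rw [← h1, hcurD]
          rw [if_pos (by simp [hpk]), ← hpv, ← hpk]
        · simp [hpk]
      calc ((pvMap g).items.map fun p => if p.1 == k then (k, pvPick vs) else p)
          = (pvMap g).items.map id := List.map_congr_left (by simpa using this)
        _ = (pvMap g).items := List.map_id _
  · -- fresh key: both sides append a new entry
    have hc' : g.contains k = false := by simpa using hc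
    have hAc : (pvMap g).contains k = false := by rw [pvMap_contains]; exact hc'
    rw [hmod, PySem.Dict.getD_of_not_contains g [] hc', pvMap_insert]
    show (if !((pvMap g).contains k) then (pvMap g).insert k v else _) = _
    rw [hAc]
    simp only [Bool.not_false, if_true]
    rfl

theorem pvNe_preserved (g : PySem.Dict String (List String)) (x : String)
    (hne : ∀ p ∈ g.items, p.2 ≠ []) : ∀ p ∈ (pvStepB g x).items, p.2 ≠ [] := by
  intro p hp
  have : p = (PySem.Str.strip (PySem.Str.lower x),
      g.getD (PySem.Str.strip (PySem.Str.lower x)) [] ++ [PySem.Str.strip x]) ∨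
      (p ∈ g.items ∧ p.1 ≠ PySem.Str.strip (PySem.Str.lower x)) :=
    (PySem.Dict.mem_items_insert g _ _ p).mp hp
  rcases this with h | ⟨h, _⟩
  · rw [h]; simp
  · exact hne p h

theorem pvLoop (xs : List String) (g : PySem.Dict String (List String))
    (hne : ∀ p ∈ g.items, p.2 ≠ []) (hnd : g.keys.Nodup) :
    xs.foldl pvStepA (pvMap g) = pvMap (xs.foldl pvStepB g) := by
  induction xs generalizing g with
  | nil => rfl
  | cons x xs ih =>
    rw [List.foldl_cons, List.foldl_cons, pvStep_sim g x hne hnd]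
    exact ih (pvStepB g x) (pvNe_preserved g x hne)
      (PySem.Dict.nodup_keys_insert g _ _ hnd)

-- ===== VERDICT (by name: the statement is the Claim_ definition above) =====
theorem dedupe_list_of_values_spec : Claim_equal_dedupe_list_of_values := by
  intro xs _
  show dedupe_list_of_values xs = dedupe_list_of_values_alt xs
  by_cases hnil : xs = []
  · simp [dedupe_list_of_values, dedupe_list_of_values_alt, hnil]
  · have hA : dedupe_list_of_values xs = (xs.foldl pvStepA PySem.Dict.empty).values := by
      unfold dedupe_list_of_values
      rw [if_neg hnil]
      exact rfl
    have hB : dedupe_list_of_values_alt xs =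
        ((xs.foldl pvStepB PySem.Dict.empty).values).foldl
          (fun result candidates => result ++ [pvPick candidates]) [] := by
      unfold dedupe_list_of_values_alt
      rw [if_neg hnil]
      exact rfl
    rw [hA, hB, PySem.List.foldl_append_singleton_eq_map, List.nil_append]
    have h0 : (PySem.Dict.empty : PySem.Dict String String) =
        pvMap (PySem.Dict.empty : PySem.Dict String (List String)) := rfl
    rw [h0, pvLoop xs PySem.Dict.empty (by simp [PySem.Dict.empty]) (by simp [PySem.Dict.empty, PySem.Dict.keys])]
    simp [pvMap, PySem.Dict.values, List.map_map, Function.comp_def]
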